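-- pv_equiv track=rewrite | github.com/maxproton/Euri | module_config.py | extract_git_config
-- ===== SOURCE A (Python) =====
-- def extract_git_config(config_content):
--     git_info = {}
--     for line in config_content.splitlines():
--         if line.startswith("[remote"):
--             git_info["remote"] = line.split()[-1]
--         if "url" in line:
--             git_info["url"] = line.split("=", 1)[-1].strip()
--     return git_info
-- ===== SOURCE B (Python) =====
-- def extract_git_config(config_content):
--     lines = config_content.splitlines()
--     remote_lines = [l for l in lines if l.startswith("[remote")]
--     url_lines = [l for l in lines if "url" in l]
--     git_info = {}
--     if remote_lines:
--         git_info["remote"] = remote_lines[-1].split()[-1]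
--     if url_lines:
--         git_info["url"] = url_lines[-1].split("=", 1)[-1].strip()
--     return git_info
-- ===== Notes on version B (the rewrite author's own statement) =====
-- stated objective: simpler
-- what changed: Replaces A's single interleaved dict-building loop by two independent filter passes, taking the last matching line per key; Pre_ excludes inputs where a url line precedes the first [remote line while both kinds occur, on which A's dict lists the same two pairs in the accidental url-first insertion order.
import Mathlib
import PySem

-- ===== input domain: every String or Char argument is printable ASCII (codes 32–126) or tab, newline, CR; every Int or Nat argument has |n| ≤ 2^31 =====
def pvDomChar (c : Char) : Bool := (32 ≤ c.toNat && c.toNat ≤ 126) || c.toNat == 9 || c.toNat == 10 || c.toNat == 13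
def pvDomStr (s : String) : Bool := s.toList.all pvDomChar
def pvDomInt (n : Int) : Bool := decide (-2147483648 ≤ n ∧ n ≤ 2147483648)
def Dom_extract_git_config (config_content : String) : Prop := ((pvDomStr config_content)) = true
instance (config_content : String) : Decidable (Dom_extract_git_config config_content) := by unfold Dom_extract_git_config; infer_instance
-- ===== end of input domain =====

-- B replaces A's single interleaved dict-building loop by two independent filter passes
-- taking the last matching line per key (objective: simpler decomposition).

-- ===== PORT A =====
-- line.split()[-1]; in A this is only evaluated when line startswith "[remote", so split₀ is nonempty and the default is never used
def pvRvOf (line : String) : String := (PySem.List.pyGet? (PySem.Str.split₀ line) (-1)).getD ""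
-- line.split("=", 1)[-1].strip(); split with sep "=" never fails and never returns [], so the defaults are never used
def pvUvOf (line : String) : String :=
  PySem.Str.strip ((PySem.List.pyGet? ((PySem.Str.splitMax? line "=" 1).getD []) (-1)).getD "")

def pvStepA (d : PySem.Dict String String) (line : String) : PySem.Dict String String :=
  let d1 := if PySem.Str.startswith line "[remote" then d.insert "remote" (pvRvOf line) else d
  if PySem.Str.isIn "url" line then d1.insert "url" (pvUvOf line) else d1

def extract_git_config (config_content : String) : List (String × String) :=
  ((PySem.Str.splitlines config_content).foldl pvStepA PySem.Dict.empty).items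

-- ===== PORT B =====
def pvIsR (l : String) : Bool := PySem.Str.startswith l "[remote"
def pvIsU (l : String) : Bool := PySem.Str.isIn "url" l

def extract_git_config_alt (config_content : String) : List (String × String) :=
  let lines := PySem.Str.splitlines config_content
  let remote_lines := lines.filter pvIsR
  let url_lines := lines.filter pvIsU
  let d0 : PySem.Dict String String := PySem.Dict.empty
  let d1 := match remote_lines.getLast? with
            | some l => d0.insert "remote" (pvRvOf l)
            | none => d0
  let d2 := match url_lines.getLast? with
            | some l => d1.insert "url" (pvUvOf l)
            | none => d1
  d2.items

-- ===== PRECONDITION & SPEC =====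
-- Pre_ excludes inputs on which a line containing "url" precedes the first "[remote" line while
-- both kinds of line occur: there A's dict holds the same two pairs in the accidental url-first
-- insertion order, while B always lists "remote" first — a dict-insertion-order corner.
def Pre_extract_git_config (config_content : String) : Prop :=
  ((PySem.Str.splitlines config_content).any pvIsR
    && (PySem.Str.splitlines config_content).any pvIsU) = true →
  ((PySem.Str.splitlines config_content).find? (fun l => pvIsR l || pvIsU l)).all pvIsR = true
instance (config_content : String) : Decidable (Pre_extract_git_config config_content) := by
  unfold Pre_extract_git_config; infer_instance

def pvWitness_extract_git_config : String := "[remote \"origin\"]\nurl = git@x"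

def Spec_extract_git_config (config_content : String) (out : List (String × String)) : Prop := out = extract_git_config_alt config_content
instance (config_content : String) (out : List (String × String)) : Decidable (Spec_extract_git_config config_content out) := by unfold Spec_extract_git_config; infer_instance

-- ===== CLAIM (what is proved, stated in full; the proofs are below) =====
def Claim_equal_extract_git_config : Prop := ∀ (config_content : String), Dom_extract_git_config config_content → Pre_extract_git_config config_content → Spec_extract_git_config config_content (extract_git_config config_content)

-- ===== LEMMAS AND PROOFS =====

-- abstract state for A's fold: (remote value?, url value?, remote-was-inserted-first flag)
def pvToDict : Option String × Option String × Bool → List (String × String)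
  | (some r, some u, true) => [("remote", r), ("url", u)]
  | (some r, some u, false) => [("url", u), ("remote", r)]
  | (some r, none, _) => [("remote", r)]
  | (none, some u, _) => [("url", u)]
  | (none, none, _) => []

def pvStepS (s : Option String × Option String × Bool) (l : String) :
    Option String × Option String × Bool :=
  let r := s.1; let u := s.2.1; let b := s.2.2
  let r' := if pvIsR l then some (pvRvOf l) else r
  let b' := if pvIsR l then (if r.isSome then b else u.isNone) else b
  if pvIsU l then (r', some (pvUvOf l), if u.isSome then b' else r'.isSome) else (r', u, b')

theorem pv_bridge (s : Option String × Option String × Bool) (l : String) :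
    pvStepA (PySem.Dict.mk (pvToDict s)) l = PySem.Dict.mk (pvToDict (pvStepS s l)) := by
  obtain ⟨r, u, b⟩ := s
  cases r <;> cases u <;> cases b <;>
    simp [pvStepA, pvStepS, pvToDict, pvIsR, pvIsU, PySem.Dict.insert] <;>
    split_ifs <;> simp_all

theorem pv_fold_bridge (ls : List String) (s : Option String × Option String × Bool) :
    ls.foldl pvStepA (PySem.Dict.mk (pvToDict s)) = PySem.Dict.mk (pvToDict (ls.foldl pvStepS s)) := by
  induction ls generalizing s with
  | nil => rfl
  | cons l t ih => simp only [List.foldl_cons, pv_bridge, ih]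

theorem pv_getLast?_cons {α : Type} (xs : List α) (x : α) :
    (x::xs).getLast? = xs.getLast?.or (some x) := by
  cases h : xs.getLast? <;> simp [List.getLast?_cons, h]

def pvNewB (ls : List String) (r u : Option String) (b : Bool) : Bool :=
  match r, u with
  | some _, some _ => b
  | some _, none => if ls.any pvIsU then true else b
  | none, some _ => if ls.any pvIsR then false else b
  | none, none =>
      match ls.find? (fun l => pvIsR l || pvIsU l) with
      | some l => pvIsR l
      | none => b

theorem pv_fold_char (ls : List String) (r u : Option String) (b : Bool) :
    ls.foldl pvStepS (r, u, b) =
      (((ls.filter pvIsR).getLast?.map pvRvOf).or r,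
       ((ls.filter pvIsU).getLast?.map pvUvOf).or u,
       pvNewB ls r u b) := by
  induction ls generalizing r u b with
  | nil => simp [pvNewB]; cases r <;> cases u <;> simp
  | cons l t ih =>
      simp only [List.foldl_cons, pvStepS]
      cases hR : pvIsR l <;> cases hU : pvIsU l <;> cases r <;> cases u <;>
        simp only [if_true, if_false, Bool.false_eq_true, Option.isSome_some,
          Option.isSome_none, Option.isNone_none, Option.isNone_some, ih] <;>
        simp [hR, hU, pv_getLast?_cons, pvNewB]

-- ===== VERDICT (by name: the statement is the Claim_ definition above) =====
theorem extract_git_config_spec : Claim_equal_extract_git_config := by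
  intro c _ hpre
  unfold Spec_extract_git_config extract_git_config extract_git_config_alt
  rw [show (PySem.Dict.empty : PySem.Dict String String)
        = PySem.Dict.mk (pvToDict (none, none, true)) from rfl,
      pv_fold_bridge, pv_fold_char]
  cases hr : ((PySem.Str.splitlines c).filter pvIsR).getLast? with
  | none =>
      cases hu : ((PySem.Str.splitlines c).filter pvIsU).getLast? <;>
        simp [pvToDict, pvNewB, hr, hu, PySem.Dict.insert, PySem.Dict.empty, PySem.Dict.items]
  | some lr =>
      cases hu : ((PySem.Str.splitlines c).filter pvIsU).getLast? with
      | none => simp [pvToDict, pvNewB, hr, hu, PySem.Dict.insert, PySem.Dict.empty, PySem.Dict.items]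
      | some lu =>
          have hAnyR : (PySem.Str.splitlines c).any pvIsR = true := by
            have := List.mem_filter.mp (List.mem_of_getLast? hr)
            exact List.any_eq_true.mpr ⟨lr, this.1, this.2⟩
          have hAnyU : (PySem.Str.splitlines c).any pvIsU = true := by
            have := List.mem_filter.mp (List.mem_of_getLast? hu)
            exact List.any_eq_true.mpr ⟨lu, this.1, this.2⟩
          have hpre' := hpre (by simp [hAnyR, hAnyU])
          have hmem : ∃ x ∈ PySem.Str.splitlines c, (pvIsR x || pvIsU x) = true := by
            refine ⟨lr, (List.mem_filter.mp (List.mem_of_getLast? hr)).1, ?_⟩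
            simp [(List.mem_filter.mp (List.mem_of_getLast? hr)).2]
          obtain ⟨f, hf⟩ := Option.isSome_iff_exists.mp (List.find?_isSome.mpr hmem)
          have hRf : pvIsR f = true := by simpa [hf] using hpre'
          simp [pvToDict, pvNewB, hr, hu, hf, hRf, PySem.Dict.insert, PySem.Dict.empty, PySem.Dict.items]
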